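-- pv_equiv track=rewrite | github.com/danielhgm/BOOM-AI | facturas/app.py | separar_facturas
-- ===== SOURCE A (Python) =====
-- def separar_facturas(text):
--     # Separar el texto en partes correspondientes a cada factura
--     facturas_texto = []
--     lines = text.split('\n')
--     factura_actual = []
--     for line in lines:
--         if ':' in line:
--             factura_actual.append(line)
--         elif factura_actual:
--             facturas_texto.append('\n'.join(factura_actual))
--             factura_actual = []
--     if factura_actual:
--         facturas_texto.append('\n'.join(factura_actual))
--     return facturas_texto
-- ===== SOURCE B (Python) =====
-- def separar_facturas(text):
--     # Scan for maximal runs of consecutive colon-containing lines (two-pointer),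
--     # joining each run directly; no accumulator/flush bookkeeping.
--     lines = text.split('\n')
--     out = []
--     i, n = 0, len(lines)
--     while i < n:
--         if ':' not in lines[i]:
--             i += 1
--             continue
--         j = i + 1
--         while j < n and ':' in lines[j]:
--             j += 1
--         out.append('\n'.join(lines[i:j]))
--         i = j
--     return out
-- ===== Notes on version B (the rewrite author's own statement) =====
-- stated objective: alternative
-- what changed: Replaced A's accumulator-plus-end-of-loop-flush state machine with a two-pointer scan that locates each maximal run of colon-containing lines and joins it directly.
import Mathlib
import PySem

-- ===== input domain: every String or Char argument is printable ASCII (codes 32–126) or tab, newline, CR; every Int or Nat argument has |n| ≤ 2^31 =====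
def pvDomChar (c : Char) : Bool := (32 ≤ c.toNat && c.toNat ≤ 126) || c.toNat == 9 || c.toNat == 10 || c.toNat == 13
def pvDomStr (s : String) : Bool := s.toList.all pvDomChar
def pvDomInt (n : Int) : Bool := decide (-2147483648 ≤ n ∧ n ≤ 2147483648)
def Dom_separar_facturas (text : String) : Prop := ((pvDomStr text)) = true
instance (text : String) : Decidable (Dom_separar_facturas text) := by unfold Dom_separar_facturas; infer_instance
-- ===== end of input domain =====

-- B replaces A's accumulator+flush state machine with a direct scan for maximal runs
-- of colon-containing lines (alternative decomposition; same cost).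

-- ===== PORT A =====
-- the loop state: (facturas_texto, factura_actual)
def sfStep (st : List String × List String) (line : String) : List String × List String :=
  if PySem.Str.isIn ":" line then (st.1, st.2 ++ [line])
  else if st.2 ≠ [] then (st.1 ++ [PySem.Str.join "\n" st.2], [])
  else st

def separar_facturas (text : String) : List String :=
  let lines := (PySem.Str.split? text "\n").getD []
  let st := lines.foldl sfStep ([], [])
  if st.2 ≠ [] then st.1 ++ [PySem.Str.join "\n" st.2] else st.1

-- ===== PORT B =====
-- the outer while loop of Source B: skip a non-colon line, or take the maximal run
-- lines[i:j] of colon lines (the inner while = takeWhile/dropWhile) and join it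
def sfRuns : List String → List String
  | [] => []
  | l :: ls =>
    if PySem.Str.isIn ":" l then
      PySem.Str.join "\n" (l :: ls.takeWhile (fun x => PySem.Str.isIn ":" x)) ::
        sfRuns (ls.dropWhile (fun x => PySem.Str.isIn ":" x))
    else
      sfRuns ls
  termination_by ls => ls.length
  decreasing_by
    · exact Nat.lt_succ_of_le (List.length_dropWhile_le _ _)
    · exact Nat.lt_succ_self _

def separar_facturas_alt (text : String) : List String :=
  sfRuns ((PySem.Str.split? text "\n").getD [])

-- ===== PRECONDITION & SPEC =====
def Spec_separar_facturas (text : String) (out : List String) : Prop := out = separar_facturas_alt text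
instance (text : String) (out : List String) : Decidable (Spec_separar_facturas text out) := by unfold Spec_separar_facturas; infer_instance

-- ===== CLAIM (what is proved, stated in full; the proofs are below) =====
def Claim_equal_separar_facturas : Prop := ∀ (text : String), Dom_separar_facturas text → Spec_separar_facturas text (separar_facturas text)

-- ===== LEMMAS AND PROOFS =====

-- A's loop body continued after the flush, with explicit pending-run accumulator
def sfAux (cur : List String) : List String → List String
  | [] => if cur ≠ [] then [PySem.Str.join "\n" cur] else []
  | l :: ls =>
    if PySem.Str.isIn ":" l then sfAux (cur ++ [l]) ls
    else (if cur ≠ [] then [PySem.Str.join "\n" cur] else []) ++ sfAux [] ls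

theorem sfAux_foldl (lines : List String) : ∀ (acc cur : List String),
    (let st := lines.foldl sfStep (acc, cur);
     if st.2 ≠ [] then st.1 ++ [PySem.Str.join "\n" st.2] else st.1)
      = acc ++ sfAux cur lines := by
  induction lines with
  | nil =>
    intro acc cur
    by_cases h : cur = [] <;> simp [sfAux, h]
  | cons l ls ih =>
    intro acc cur
    by_cases hl : PySem.Chars.isIn [':'] l.toList = true
    · simpa [sfStep, hl, sfAux] using ih acc (cur ++ [l])
    · by_cases hc : cur = []
      · simpa [sfStep, hl, hc, sfAux] using ih acc []
      · simpa [sfStep, hl, hc, sfAux] using ih (acc ++ [PySem.Str.join "\n" cur]) []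

theorem sfAux_run (lines : List String) : ∀ (cur : List String), cur ≠ [] →
    sfAux cur lines
      = PySem.Str.join "\n" (cur ++ lines.takeWhile (fun x => PySem.Str.isIn ":" x)) ::
          sfAux [] (lines.dropWhile (fun x => PySem.Str.isIn ":" x)) := by
  induction lines with
  | nil => intro cur hc; simp [sfAux, hc]
  | cons l ls ih =>
    intro cur hc
    by_cases hl : PySem.Chars.isIn [':'] l.toList = true
    · have h2 := ih (cur ++ [l]) (by simp)
      simp only [List.append_assoc] at h2
      simp [sfAux, hl, h2]
    · simp [sfAux, hl, hc]

theorem sfAux_eq_sfRuns (lines : List String) : sfAux [] lines = sfRuns lines := by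
  induction lines using sfRuns.induct with
  | case1 => simp [sfAux, sfRuns]
  | case2 l ls hl ih =>
    have h1 := sfAux_run ls [l] (by simp)
    rw [sfRuns, if_pos hl, ← ih, sfAux, if_pos hl]
    simpa using h1
  | case3 l ls hl ih =>
    rw [sfRuns, if_neg hl, ← ih, sfAux, if_neg hl]
    simp

-- ===== VERDICT (by name: the statement is the Claim_ definition above) =====
theorem separar_facturas_spec : Claim_equal_separar_facturas := by
  intro text _
  show separar_facturas text = separar_facturas_alt text
  unfold separar_facturas separar_facturas_alt
  rw [sfAux_foldl, sfAux_eq_sfRuns]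
  simp
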